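-- pv_equiv track=rewrite | github.com/dabiged/adventofcode | 2018/day02.py | checksum_one_label
-- ===== SOURCE A (Python) =====
-- def checksum_one_label(boxid: str) -> dict:
--     """
--     Create a dict which contains a bool int represetation of if a str contains a
--     double or triple letter.
--     """
--     # Create a dict of each letter and how many there are.
--     characters={}
--
--     for character in boxid:
--         if character in characters.keys():
--             characters[character] += 1
--         else:
--             characters[character] = 1
--
--     # Create a dict with how many double and triples there are.
--     bool_dict = {}
--     for value in characters.values():
--         for num in range(2,4):
--             if value == num:
--                 bool_dict[num] = 1
--
--     return bool_dict
-- ===== SOURCE B (Python) =====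
-- def checksum_one_label(boxid: str) -> dict:
--     """Single pass over the string: at each character's first occurrence,
--     count its occurrences with str.count and record 2/3 directly."""
--     result = {}
--     for i, ch in enumerate(boxid):
--         if ch not in boxid[:i]:
--             c = boxid.count(ch)
--             if c in (2, 3):
--                 result[c] = 1
--     return result
-- ===== Notes on version B (the rewrite author's own statement) =====
-- stated objective: simpler
-- what changed: Instead of building a character-frequency dict and then scanning its values against range(2,4), B makes a single pass over the string and, at each character's first occurrence, uses str.count to record 2 or 3 directly.
import Mathlib
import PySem

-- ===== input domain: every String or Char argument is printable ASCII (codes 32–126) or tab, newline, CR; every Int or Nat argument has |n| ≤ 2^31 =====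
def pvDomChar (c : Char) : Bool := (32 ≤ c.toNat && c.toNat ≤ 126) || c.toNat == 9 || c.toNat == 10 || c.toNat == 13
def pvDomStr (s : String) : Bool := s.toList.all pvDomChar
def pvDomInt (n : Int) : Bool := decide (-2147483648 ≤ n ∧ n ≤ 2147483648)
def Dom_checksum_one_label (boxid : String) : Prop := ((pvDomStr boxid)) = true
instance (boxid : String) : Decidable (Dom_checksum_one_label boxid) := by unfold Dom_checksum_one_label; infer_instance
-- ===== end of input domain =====

-- B replaces A's frequency-dict build plus nested range(2,4) value scan by one pass over the
-- string that, at each character's first occurrence, counts it with str.count (simpler; not faster).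

-- ===== PORT A =====
def checksum_one_label (boxid : String) : List (Int × Int) :=
  -- characters = {}; for character in boxid: if in keys: +=1 else: =1
  -- bool_dict = {}; for value in characters.values(): for num in range(2,4): if value == num: bool_dict[num] = 1
  ((boxid.toList.foldl
      (fun d c => if d.contains c then d.insert c (d.getD c 0 + 1) else d.insert c 1)
      (PySem.Dict.empty : PySem.Dict Char Int)).values.foldl
    (fun bd v =>
      (PySem.List.pyRange 2 4 1).foldl
        (fun bd num => if v == num then bd.insert num 1 else bd) bd)
    (PySem.Dict.empty : PySem.Dict Int Int)).items

-- ===== PORT B =====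
def checksum_one_label_alt (boxid : String) : List (Int × Int) :=
  -- result = {}; for i, ch in enumerate(boxid): if ch not in boxid[:i]:
  --   if boxid.count(ch) in (2, 3): result[boxid.count(ch)] = 1
  ((PySem.List.enumerate boxid.toList 0).foldl
      (fun d p =>
        if (boxid.toList.take p.1.toNat).contains p.2 then d
        else
          if (boxid.toList.count p.2 : Int) = 2 ∨ (boxid.toList.count p.2 : Int) = 3 then
            d.insert (boxid.toList.count p.2 : Int) 1
          else d)
      (PySem.Dict.empty : PySem.Dict Int Int)).items

-- ===== PRECONDITION & SPEC =====
def Spec_checksum_one_label (boxid : String) (out : List (Int × Int)) : Prop := out = checksum_one_label_alt boxid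
instance (boxid : String) (out : List (Int × Int)) : Decidable (Spec_checksum_one_label boxid out) := by unfold Spec_checksum_one_label; infer_instance

-- ===== CLAIM (what is proved, stated in full; the proofs are below) =====
def Claim_equal_checksum_one_label : Prop := ∀ (boxid : String), Dom_checksum_one_label boxid → Spec_checksum_one_label boxid (checksum_one_label boxid)

-- ===== LEMMAS AND PROOFS =====

-- the shared per-character step: record the count of k in cs if it is 2 or 3
def pvStep (cs : List Char) (d : PySem.Dict Int Int) (k : Char) : PySem.Dict Int Int :=
  if (cs.count k : Int) = 2 ∨ (cs.count k : Int) = 3 then d.insert (cs.count k : Int) 1 else d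

-- the characters of xs that are first occurrences relative to the already-seen prefix
def pvFresh (seen : List Char) : List Char → List Char
  | [] => []
  | x :: t => if seen.contains x then pvFresh seen t else x :: pvFresh (seen ++ [x]) t

lemma pvFresh_congr : ∀ (t s1 s2 : List Char), (∀ c, c ∈ s1 ↔ c ∈ s2) →
    pvFresh s1 t = pvFresh s2 t := by
  intro t
  induction t with
  | nil => intro s1 s2 _; rfl
  | cons x t ih =>
    intro s1 s2 h
    have hc : s1.contains x = s2.contains x := by
      by_cases hx : x ∈ s1
      · simp [hx, (h x).mp hx]
      · have hx2 : x ∉ s2 := fun m => hx ((h x).mpr m)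
        simp [hx, hx2]
    rw [pvFresh, pvFresh, hc]
    by_cases hx : s2.contains x = true
    · rw [if_pos hx, if_pos hx, ih s1 s2 h]
    · rw [if_neg hx, if_neg hx, ih (s1 ++ [x]) (s2 ++ [x]) (by intro c; simp [h c])]

lemma pvFresh_spec : ∀ (xs seen : List Char),
    PySem.Set.update (PySem.Set.ofList seen) xs = PySem.Set.ofList seen ++ pvFresh seen xs := by
  intro xs
  induction xs with
  | nil => intro seen; simp [pvFresh]
  | cons x t ih =>
    intro seen
    rw [PySem.Set.update_cons, pvFresh]
    by_cases hx : x ∈ seen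
    · have hmem : x ∈ PySem.Set.ofList seen := by rw [PySem.Set.mem_ofList]; exact hx
      rw [PySem.Set.add_of_mem hmem, if_pos (by simpa using hx), ih seen]
    · have hmem : x ∉ PySem.Set.ofList seen := by rw [PySem.Set.mem_ofList]; exact hx
      have hsx : PySem.Set.ofList (seen ++ [x]) = PySem.Set.ofList seen ++ [x] := by
        rw [PySem.Set.ofList_append_singleton, PySem.Set.add_of_not_mem hmem]
      rw [PySem.Set.add_of_not_mem hmem, if_neg (by simpa using hx), ← hsx, ih (seen ++ [x]), hsx]
      simp

lemma pvFresh_nil (cs : List Char) : pvFresh [] cs = PySem.Set.ofList cs := by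
  have h := pvFresh_spec cs []
  simpa [PySem.Set.update_nil_left] using h.symm

lemma pvFoldB : ∀ (xs seen : List Char) (d : PySem.Dict Int Int),
    (PySem.List.enumerate xs (seen.length : Int)).foldl
      (fun d p =>
        if ((seen ++ xs).take p.1.toNat).contains p.2 then d
        else
          if ((seen ++ xs).count p.2 : Int) = 2 ∨ ((seen ++ xs).count p.2 : Int) = 3 then
            d.insert ((seen ++ xs).count p.2 : Int) 1
          else d)
      d
    = (pvFresh seen xs).foldl (pvStep (seen ++ xs)) d := by
  intro xs
  induction xs with
  | nil => intro seen d; simp [pvFresh, PySem.List.enumerate_nil]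
  | cons x t ih =>
    intro seen d
    have htake : (List.take ((seen.length : Int)).toNat (seen ++ x :: t)) = seen := by
      simp [List.take_left']
    have hcomb : seen ++ x :: t = (seen ++ [x]) ++ t := by simp
    have hlen : (seen.length : Int) + 1 = ((seen ++ [x]).length : Int) := by simp
    rw [PySem.List.enumerate_cons, List.foldl_cons, pvFresh]
    show List.foldl _
        (if (List.take ((seen.length : Int)).toNat (seen ++ x :: t)).contains x then _ else _) _ = _
    rw [htake]
    by_cases hx : x ∈ seen
    · rw [if_pos (by simpa using hx), if_pos (by simpa using hx), hcomb, hlen,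
          ih (seen ++ [x]) d, pvFresh_congr t (seen ++ [x]) seen
            (by intro c; simp only [List.mem_append, List.mem_singleton]
                exact ⟨fun h => h.elim id (fun h => h ▸ hx), Or.inl⟩)]
    · rw [if_neg (show ¬(seen.contains x = true) by simpa using hx),
          if_neg (show ¬(seen.contains x = true) by simpa using hx), List.foldl_cons]
      show _ = List.foldl (pvStep (seen ++ x :: t)) (pvStep (seen ++ x :: t) d x) (pvFresh (seen ++ [x]) t)
      rw [show pvStep (seen ++ x :: t) d x
            = (if ((seen ++ x :: t).count x : Int) = 2 ∨ ((seen ++ x :: t).count x : Int) = 3 then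
                 d.insert ((seen ++ x :: t).count x : Int) 1 else d) from rfl,
          hcomb, hlen, ih (seen ++ [x])]

-- ===== VERDICT (by name: the statement is the Claim_ definition above) =====
theorem checksum_one_label_spec : Claim_equal_checksum_one_label := by
  intro boxid _
  unfold Spec_checksum_one_label
  -- A's counting loop is collections.Counter
  have h1 : (fun (d : PySem.Dict Char Int) c =>
      if d.contains c then d.insert c (d.getD c 0 + 1) else d.insert c 1)
      = (fun (d : PySem.Dict Char Int) c => d.insert c (d.getD c 0 + 1)) := by
    funext d c
    by_cases h : d.contains c = true
    · simp [h]
    · have h' : d.contains c = false := by simpa using h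
      rw [if_neg (by simp [h']), PySem.Dict.getD_of_not_contains d 0 h']
      norm_num
  -- the inner range(2,4) loop, as one conditional insert
  have hF : ∀ (bd : PySem.Dict Int Int) (v : Int),
      (PySem.List.pyRange 2 4 1).foldl (fun bd num => if v == num then bd.insert num 1 else bd) bd
      = if v = 2 ∨ v = 3 then bd.insert v 1 else bd := by
    intro bd v
    have hr : PySem.List.pyRange 2 4 1 = [2, 3] := by decide
    rw [hr]
    simp only [List.foldl_cons, List.foldl_nil, beq_iff_eq]
    by_cases h2 : v = 2
    · subst h2; simp
    · by_cases h3 : v = 3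
      · subst h3; simp
      · simp [h2, h3]
  have hvals : (PySem.Dict.counter boxid.toList).values
      = (PySem.Set.ofList boxid.toList).map (fun k => (boxid.toList.count k : Int)) := by
    show ((PySem.Dict.counter boxid.toList).items).map (·.2) = _
    rw [PySem.Dict.items_counter, List.map_map]
    rfl
  have hAeq : checksum_one_label boxid
      = ((PySem.Set.ofList boxid.toList).foldl (pvStep boxid.toList) PySem.Dict.empty).items := by
    unfold checksum_one_label
    rw [h1, PySem.Dict.foldl_insert_getD_add_one_eq_counter]
    simp only [hvals, List.foldl_map]
    have hfun : (fun (x : PySem.Dict Int Int) (y : Char) =>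
        (PySem.List.pyRange 2 4 1).foldl
          (fun bd num => if (boxid.toList.count y : Int) == num then bd.insert num 1 else bd) x)
        = pvStep boxid.toList := by
      funext bd k
      rw [hF bd (boxid.toList.count k : Int)]
      rfl
    rw [hfun]
  have hBeq : checksum_one_label_alt boxid
      = ((PySem.Set.ofList boxid.toList).foldl (pvStep boxid.toList) PySem.Dict.empty).items := by
    unfold checksum_one_label_alt
    have hB := pvFoldB boxid.toList [] PySem.Dict.empty
    simp only [List.nil_append, List.length_nil, Nat.cast_zero, pvFresh_nil] at hB
    rw [hB]
  rw [hAeq, hBeq]
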